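-- pv_equiv track=rewrite | github.com/alexandraback/datacollection | solutions_5636311922769920_0/Python/aggelgian/D.py | solve
-- ===== SOURCE A (Python) =====
-- def solve(k, c, s):
--   if s < k:
--     # FIXME
--     return "IMPOSSIBLE"
--   sol = []
--   for i in range(k):
--     pos = (i + 1) + i * k * (c - 1)
--     sol.append(str(pos))
--   return " ".join(sol)
-- ===== SOURCE B (Python) =====
-- def solve(k, c, s):
--   if s < k:
--     return "IMPOSSIBLE"
--   if k <= 0:
--     return ""
--   d = 1 + k * (c - 1)
--
--   def seg(i, j):
--     # string for 0-based positions i..j-1, built by divide and conquer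
--     if j - i == 1:
--       return str(1 + i * d)
--     m = (i + j) // 2
--     return seg(i, m) + " " + seg(m, j)
--
--   return seg(0, k)
-- ===== Notes on version B (the rewrite author's own statement) =====
-- stated objective: alternative
-- what changed: Replaces the append-each-value-then-join loop by a divide-and-conquer construction: the constant step d is computed once and the output string for positions i..j-1 is built recursively as left half + ' ' + right half, splitting at the midpoint, with str(1+i*d) at the leaves.
import Mathlib
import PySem

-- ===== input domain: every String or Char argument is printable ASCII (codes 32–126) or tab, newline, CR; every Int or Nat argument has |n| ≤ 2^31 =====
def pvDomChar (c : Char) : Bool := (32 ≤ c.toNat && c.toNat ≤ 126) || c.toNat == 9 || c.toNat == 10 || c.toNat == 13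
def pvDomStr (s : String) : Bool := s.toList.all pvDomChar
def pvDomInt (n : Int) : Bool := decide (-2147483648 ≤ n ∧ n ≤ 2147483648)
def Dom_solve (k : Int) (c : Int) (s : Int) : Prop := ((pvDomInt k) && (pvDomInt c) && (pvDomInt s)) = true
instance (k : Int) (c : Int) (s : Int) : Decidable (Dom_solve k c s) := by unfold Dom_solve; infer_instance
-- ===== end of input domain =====

-- B replaces the build-a-list-then-join loop by a divide-and-conquer construction of the output
-- string over the index interval, with the constant step d computed once (alternative algorithm).
-- ===== PORT A =====
def solve (k : Int) (c : Int) (s : Int) : String :=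
  if s < k then "IMPOSSIBLE"
  else
    let sol := (PySem.List.pyRange 0 k 1).foldl
      (fun sol i => sol ++ [PySem.Int.toStr ((i + 1) + i * k * (c - 1))]) []
    PySem.Str.join " " sol

-- ===== PORT B =====
-- B-side helper: 'def seg(i, j): …' — divide and conquer on the index interval [i, j)
def solveAltSeg (d : Int) (i j : Nat) : String :=
  if j - i ≤ 1 then
    -- the 'else ""' branch only totalizes the function: Python's seg is never called with j ≤ i
    if i < j then PySem.Int.toStr (1 + (i : Int) * d) else ""
  else
    solveAltSeg d i ((i + j) / 2) ++ " " ++ solveAltSeg d ((i + j) / 2) j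
termination_by j - i
decreasing_by all_goals omega

def solve_alt (k : Int) (c : Int) (s : Int) : String :=
  if s < k then "IMPOSSIBLE"
  else if k ≤ 0 then ""
  else
    let d := 1 + k * (c - 1)
    solveAltSeg d 0 k.toNat

-- ===== PRECONDITION & SPEC =====
def Spec_solve (k : Int) (c : Int) (s : Int) (out : String) : Prop := out = solve_alt k c s
instance (k : Int) (c : Int) (s : Int) (out : String) : Decidable (Spec_solve k c s out) := by unfold Spec_solve; infer_instance

-- ===== CLAIM =====
def Claim_equal_solve : Prop := ∀ (k : Int) (c : Int) (s : Int), Dom_solve k c s → Spec_solve k c s (solve k c s)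

-- ===== LEMMAS AND PROOFS =====

theorem foldl_append_map (f : Int → String) (l : List Int) (init : List String) :
    l.foldl (fun sol i => sol ++ [f i]) init = init ++ l.map f := by
  induction l generalizing init with
  | nil => simp
  | cons x xs ih => simp [ih]

theorem join_nil_str (sep : String) : PySem.Str.join sep [] = "" := by
  apply String.ext
  simp [PySem.Str.toList_join, PySem.Chars.join_nil]

theorem join_single_str (sep x : String) : PySem.Str.join sep [x] = x := by
  apply String.ext
  simp [PySem.Str.toList_join, PySem.Chars.join_singleton]

theorem join_cons_str (sep a : String) (l : List String) (h : l ≠ []) :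
    PySem.Str.join sep (a :: l) = a ++ sep ++ PySem.Str.join sep l := by
  cases l with
  | nil => exact absurd rfl h
  | cons b l =>
    apply String.ext
    simp [PySem.Str.toList_join, PySem.Chars.join_cons_cons, String.toList_append,
      List.append_assoc]

theorem join_append_str (sep : String) (l1 l2 : List String) (h1 : l1 ≠ []) (h2 : l2 ≠ []) :
    PySem.Str.join sep (l1 ++ l2) = PySem.Str.join sep l1 ++ sep ++ PySem.Str.join sep l2 := by
  induction l1 with
  | nil => exact absurd rfl h1
  | cons a l1 ih =>
    cases l1 with
    | nil => simp [join_cons_str sep a l2 h2, join_single_str]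
    | cons b l1 =>
      rw [List.cons_append, join_cons_str sep a ((b :: l1) ++ l2) (by simp),
        join_cons_str sep a (b :: l1) (by simp), ih (by simp)]
      simp [String.append_assoc]

-- the divide-and-conquer segment equals the join of its positions
theorem solveAltSeg_eq_join (d : Int) (n i j : Nat) (hn : j - i = n) (hij : i < j) :
    solveAltSeg d i j =
      PySem.Str.join " " ((List.range (j - i)).map (fun t : Nat => PySem.Int.toStr (1 + ((i + t : Nat) : Int) * d))) := by
  induction n using Nat.strong_induction_on generalizing i j with
  | _ n ih =>
    rw [solveAltSeg]
    by_cases hbase : j - i ≤ 1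
    · have hj : j = i + 1 := by omega
      subst hj
      simp [hij, join_single_str]
    · simp only [hbase, if_false]
      have hm1 : i < (i + j) / 2 := by omega
      have hm2 : (i + j) / 2 < j := by omega
      rw [ih ((i + j) / 2 - i) (by omega) i ((i + j) / 2) rfl hm1,
        ih (j - (i + j) / 2) (by omega) ((i + j) / 2) j rfl hm2,
        ← join_append_str _ _ _ (by simp; omega) (by simp; omega)]
      congr 1
      rw [show j - i = ((i + j) / 2 - i) + (j - (i + j) / 2) by omega, List.range_add,
        List.map_append, List.map_map]
      congr 1
      apply List.map_congr_left
      intro t ht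
      simp only [Function.comp_apply]
      have harg : i + ((i + j) / 2 - i + t) = (i + j) / 2 + t := by omega
      rw [harg]

theorem solve_spec : Claim_equal_solve := by
  intro k c s _
  unfold Spec_solve solve solve_alt
  by_cases h : s < k
  · simp [h]
  · simp only [h, if_false]
    rw [foldl_append_map, List.nil_append]
    by_cases hk : k ≤ 0
    · simp [hk, PySem.List.pyRange, show ¬ (0 : Int) < k by omega, join_nil_str]
    · simp only [hk, if_false]
      rw [solveAltSeg_eq_join _ k.toNat 0 k.toNat rfl (by omega), Nat.sub_zero,
        PySem.List.pyRange_one, Int.sub_zero, List.map_map]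
      congr 1
      apply List.map_congr_left
      intro t ht
      simp only [Function.comp_apply, Nat.zero_add]
      congr 1
      ring
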